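-- pv_equiv track=rewrite | github.com/gith-karan/vast-devops-project | services/url_views.py | summarize_trackers
-- ===== SOURCE A (Python) =====
-- def summarize_trackers(trackers):
--     """Summarize tracker types for display"""
--     summary = []
--     tracker_types = {}
--
--     for tracker in trackers:
--         tracker_type = tracker.get('type', 'Unknown')
--         if tracker_type in tracker_types:
--             tracker_types[tracker_type] += 1
--         else:
--             tracker_types[tracker_type] = 1
--
--     for tracker_type, count in tracker_types.items():
--         summary.append(f"{tracker_type} ({count})")
--
--     return summary
-- ===== SOURCE B (Python) =====
-- def summarize_trackers(trackers):
--     """Summarize tracker types for display"""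
--     types = [t.get('type', 'Unknown') for t in trackers]
--     summary = []
--     while types:
--         tt = types[0]
--         rest = [x for x in types if x != tt]
--         summary.append(f"{tt} ({len(types) - len(rest)})")
--         types = rest
--     return summary
-- ===== Notes on version B (the rewrite author's own statement) =====
-- stated objective: alternative
-- what changed: Replaces the dict tally with a partition-based grouping loop: repeatedly take the first remaining label, count it by the length drop when filtering it out of the work list, and continue on the filtered remainder; no counting dictionary is ever built.
import Mathlib
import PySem

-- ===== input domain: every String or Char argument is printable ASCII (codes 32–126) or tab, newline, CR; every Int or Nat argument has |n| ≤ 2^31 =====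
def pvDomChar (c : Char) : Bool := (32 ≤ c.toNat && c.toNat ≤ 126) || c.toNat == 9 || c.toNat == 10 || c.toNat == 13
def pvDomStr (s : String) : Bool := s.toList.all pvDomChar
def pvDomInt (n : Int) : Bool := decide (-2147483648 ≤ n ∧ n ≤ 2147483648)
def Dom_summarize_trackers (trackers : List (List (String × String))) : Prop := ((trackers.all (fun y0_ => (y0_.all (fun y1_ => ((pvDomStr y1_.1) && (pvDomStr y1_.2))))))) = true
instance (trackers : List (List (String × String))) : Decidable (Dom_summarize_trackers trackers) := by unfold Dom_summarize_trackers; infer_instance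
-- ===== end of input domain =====

-- B groups by repeated partitioning: take the first remaining label, count it by the length
-- drop when filtering it out, recurse on the remainder — no counting dictionary (alternative,
-- not faster).

-- ===== PORT A =====
-- tracker.get('type', 'Unknown') on the dict built from the association list
def pvLabel (tracker : List (String × String)) : String :=
  (PySem.Dict.ofList tracker).getD "type" "Unknown"

def summarize_trackers (trackers : List (List (String × String))) : List String :=
  let tracker_types : PySem.Dict String Int :=
    trackers.foldl (fun d tracker =>
      let tt := pvLabel tracker
      if d.contains tt then d.insert tt (d.getD tt 0 + 1) else d.insert tt 1)
      PySem.Dict.empty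
  tracker_types.items.foldl
    (fun summary p => summary ++ [p.1 ++ " (" ++ PySem.Int.toStr p.2 ++ ")"]) []

-- ===== PORT B =====
-- the while loop over the shrinking label list, as recursion on the work list
def pvGroup : List String → List String
  | [] => []
  | tt :: restL =>
    let rest := restL.filter (fun x => !(x == tt))
    (tt ++ " (" ++ PySem.Int.toStr ((1 + restL.length : Int) - rest.length) ++ ")") ::
      pvGroup rest
termination_by l => l.length
decreasing_by
  simp
  exact le_trans (List.length_filter_le _ _) (by simp)

def summarize_trackers_alt (trackers : List (List (String × String))) : List String :=
  pvGroup (trackers.map pvLabel)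

-- ===== PRECONDITION & SPEC =====
def Spec_summarize_trackers (trackers : List (List (String × String))) (out : List String) : Prop := out = summarize_trackers_alt trackers
instance (trackers : List (List (String × String))) (out : List String) : Decidable (Spec_summarize_trackers trackers out) := by unfold Spec_summarize_trackers; infer_instance

-- ===== CLAIM =====
def Claim_equal_summarize_trackers : Prop := ∀ (trackers : List (List (String × String))), Dom_summarize_trackers trackers → Spec_summarize_trackers trackers (summarize_trackers trackers)

-- ===== LEMMAS AND PROOFS =====

-- A's counting loop builds exactly the Counter of the label list
lemma summarize_trackers_fold_eq_counter (trackers : List (List (String × String))) :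
    trackers.foldl (fun d tracker =>
      let tt := pvLabel tracker
      if d.contains tt then d.insert tt (d.getD tt 0 + 1) else d.insert tt 1)
      PySem.Dict.empty
    = PySem.Dict.counter (trackers.map pvLabel) := by
  rw [← PySem.Dict.foldl_insert_getD_add_one_eq_counter, List.foldl_map]
  apply PySem.List.foldl_congr_mem
  intro d tracker _
  by_cases h : d.contains (pvLabel tracker)
  · simp [h]
  · rw [if_neg h, PySem.Dict.getD_of_not_contains]
    · norm_num
    · simpa using h

lemma pvGroup_nil : pvGroup [] = [] := by unfold pvGroup; rfl

lemma pvGroup_cons (tt : String) (l : List String) : pvGroup (tt :: l) =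
    (tt ++ " (" ++ PySem.Int.toStr ((1 + l.length : Int)
        - (l.filter (fun x => !(x == tt))).length) ++ ")") ::
      pvGroup (l.filter (fun x => !(x == tt))) := by
  conv_lhs => rw [pvGroup.eq_def]

-- folding Set.add skips every element already in the accumulator
lemma foldl_add_skip (l : List String) (s : PySem.Set String) (a : String) (ha : a ∈ s) :
    l.foldl PySem.Set.add s = (l.filter (fun x => !(x == a))).foldl PySem.Set.add s := by
  induction l generalizing s with
  | nil => rfl
  | cons x l ih =>
    by_cases hx : x = a
    · subst hx
      have hf : (x :: l).filter (fun y => !(y == x)) = l.filter (fun y => !(y == x)) := by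
        simp
      have hadd : PySem.Set.add s x = s := by simp [PySem.Set.add, ha]
      rw [hf, List.foldl_cons, hadd]
      exact ih s ha
    · have hf : (x :: l).filter (fun y => !(y == a)) = x :: l.filter (fun y => !(y == a)) := by
        simp [hx]
      rw [hf, List.foldl_cons, List.foldl_cons]
      exact ih _ ((PySem.Set.mem_add s x a).mpr (Or.inl ha))

-- a head element absent from the tail can be pulled out of the fold
lemma foldl_add_pull (l : List String) (s : PySem.Set String) (a : String)
    (ha : ∀ x ∈ l, x ≠ a) :
    l.foldl PySem.Set.add ([a] ++ s) = a :: l.foldl PySem.Set.add s := by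
  induction l generalizing s with
  | nil => rfl
  | cons x l ih =>
    have hxa : x ≠ a := ha x (List.mem_cons_self ..)
    simp only [List.foldl_cons]
    by_cases h : x ∈ s
    · rw [show PySem.Set.add ([a] ++ s) x = [a] ++ s by
          simp [PySem.Set.add, h],
        show PySem.Set.add s x = s by simp [PySem.Set.add, h]]
      exact ih s (fun y hy => ha y (List.mem_cons_of_mem _ hy))
    · rw [show PySem.Set.add ([a] ++ s) x = [a] ++ (s ++ [x]) by
          simp [PySem.Set.add, hxa, h],
        show PySem.Set.add s x = s ++ [x] by simp [PySem.Set.add, h]]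
      exact ih _ (fun y hy => ha y (List.mem_cons_of_mem _ hy))

-- first-occurrence dedup peels its head and filters it from the tail
lemma dedup_cons (a : String) (l : List String) :
    PySem.List.dedup (a :: l)
      = a :: PySem.List.dedup (l.filter (fun x => !(x == a))) := by
  simp only [PySem.List.dedup, PySem.Set.ofList, List.foldl_cons]
  have h0 : PySem.Set.add PySem.Set.empty a = [a] ++ ([] : List String) := by
    simp [PySem.Set.add, PySem.Set.empty]
  rw [h0, foldl_add_skip l ([a] ++ []) a (by simp),
    foldl_add_pull _ _ a (by intro x hx; simpa using (List.of_mem_filter hx))]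
  rfl

-- counting a value and filtering it out partition the list's length
lemma count_add_filter_length (l : List String) (tt : String) :
    l.count tt + (l.filter (fun x => !(x == tt))).length = l.length := by
  induction l with
  | nil => rfl
  | cons x l ih =>
    by_cases h : x = tt <;> simp [h] <;> omega

-- B's grouping loop produces the dedup-ordered labels with their counts
lemma pvGroup_eq (l : List String) :
    pvGroup l = (PySem.List.dedup l).map
      (fun tt => tt ++ " (" ++ PySem.Int.toStr ((l.count tt : Int)) ++ ")") := by
  generalize hn : l.length = n
  induction n using Nat.strong_induction_on generalizing l with
  | _ n ih =>
    cases l with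
    | nil =>
      simp [pvGroup_nil, PySem.List.dedup, PySem.Set.ofList, PySem.Set.empty]
    | cons tt restL =>
      rw [pvGroup_cons, dedup_cons, List.map_cons]
      have hlen : (restL.filter (fun x => !(x == tt))).length < n := by
        have h1 : (restL.filter (fun x => !(x == tt))).length ≤ restL.length :=
          List.length_filter_le _ _
        simp only [List.length_cons] at hn
        omega
      rw [ih _ hlen _ rfl]
      refine congrArg₂ List.cons ?_ ?_
      · have h1 : restL.count tt + (restL.filter (fun x => !(x == tt))).length
            = restL.length := count_add_filter_length restL tt
        have h3 : (tt :: restL).count tt = restL.count tt + 1 := by simp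
        congr 2
        refine congrArg PySem.Int.toStr ?_
        rw [h3]
        push_cast
        omega
      · apply List.map_congr_left
        intro b hb
        have hbmem : b ∈ restL.filter (fun x => !(x == tt)) := by
          have hb' := hb
          rw [PySem.List.dedup] at hb'
          exact (PySem.Set.mem_ofList _ _).mp hb'
        have hbne : (!(b == tt)) = true := (List.mem_filter.mp hbmem).2
        have hbnet : b ≠ tt := by simpa using hbne
        have hcf : (restL.filter (fun x => !(x == tt))).count b = restL.count b :=
          List.count_filter hbne
        have hcc : (tt :: restL).count b = restL.count b := by
          simp [Ne.symm hbnet]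
        rw [hcf, hcc]

-- ===== VERDICT =====
theorem summarize_trackers_spec : Claim_equal_summarize_trackers := by
  intro trackers _
  unfold Spec_summarize_trackers summarize_trackers summarize_trackers_alt
  dsimp only
  rw [summarize_trackers_fold_eq_counter, PySem.Dict.items_counter,
    PySem.List.foldl_append_singleton_eq_map, List.map_map, pvGroup_eq]
  simp [PySem.List.dedup_eq_ofList, Function.comp]
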